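-- pv_equiv track=rewrite | github.com/WilliamMajanja-zz/hack.chat-bot | commands/katex.py | katex_generator
-- ===== SOURCE A (Python) =====
-- def katex_generator(txt, size, color):
--     """Returns a KaTeX formatted string (e.g., passing "hi" will return "${h}{i}$").
--
--     Keyword arguments:
--     txt -- string; contains text to be converted to katex
--     size -- string; changes the font size of <txt>
--             values: "tiny" "scriptsize" "footnotesize" "small" "normalsize" "large" "Large" "LARGE" "huge" "Huge"
--     color -- string; changes the color of <txt>
--              values: "red", "orange", "green", "blue", "pink", "purple", "gray", "rainbow", "" (empty string for white)
--
--     "{", "}" and "?" must be avoided in <txt> as KaTeX doesn't support them.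
--     """
--
--     txt = " ".join(txt.split())
--     if color and color != "rainbow":
--         katexColor = "\\" + color
--     else:
--         katexColor = ""
--     colors = ["red", "orange", "green", "blue", "purple", "pink"]
--     text = ""
--     index = 0
--     for char in txt:
--         if color == "rainbow":
--             katexColor = "\\" + colors[index % 6]
--         if char == " ":
--             text += "\\ "
--         else:
--             text += katexColor + "{" + char + "}"
--             index += 1
--     txt = text
--     size = "\\" + size if size else size
--     return "${}$".format(size + txt)
-- ===== SOURCE B (Python) =====
-- def katex_generator(txt, size, color):
--     """Word-wise KaTeX builder: per-word char pieces joined with '\\ ' (alternative decomposition of A's flat char loop)."""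
--     colors = ["red", "orange", "green", "blue", "purple", "pink"]
--     pieces = []
--     count = 0
--     for word in txt.split():
--         buf = []
--         for ch in word:
--             if color == "rainbow":
--                 kc = "\\" + colors[count % 6]
--             elif color:
--                 kc = "\\" + color
--             else:
--                 kc = ""
--             buf.append(kc + "{" + ch + "}")
--             count += 1
--         pieces.append("".join(buf))
--     body = "\\ ".join(pieces)
--     prefix = "\\" + size if size else ""
--     return "$" + prefix + body + "$"
-- ===== Notes on version B (the rewrite author's own statement) =====
-- stated objective: alternative
-- what changed: B replaces A's re-join of the split text followed by a flat per-character loop with a space branch by a word-wise construction: nested loops build one piece string per word (threading the rainbow counter across words) and the pieces are joined with '\ '.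
import Mathlib
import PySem

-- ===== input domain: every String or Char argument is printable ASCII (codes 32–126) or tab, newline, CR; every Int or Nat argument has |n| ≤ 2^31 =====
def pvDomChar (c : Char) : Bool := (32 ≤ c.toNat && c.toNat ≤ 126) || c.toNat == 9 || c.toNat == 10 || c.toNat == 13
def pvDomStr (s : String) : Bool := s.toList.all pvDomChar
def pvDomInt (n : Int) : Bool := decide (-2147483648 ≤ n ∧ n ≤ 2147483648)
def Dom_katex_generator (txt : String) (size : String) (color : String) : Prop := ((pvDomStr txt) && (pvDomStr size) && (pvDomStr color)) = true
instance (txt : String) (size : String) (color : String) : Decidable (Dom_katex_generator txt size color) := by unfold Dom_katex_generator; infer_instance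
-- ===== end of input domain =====

-- B rebuilds the markup word-by-word (nested folds over split words joined with "\ ") instead of A's
-- flat character loop over the re-joined text; same output, an alternative decomposition, not faster.

-- ===== PORT A =====
def pvColorsA : List (List Char) :=
  ["red".toList, "orange".toList, "green".toList, "blue".toList, "purple".toList, "pink".toList]

-- one iteration of A's `for char in txt` loop; state = (text, index)
def pvStepA (color : String) (katexColor : List Char) (st : List Char × Nat) (ch : Char) :
    List Char × Nat :=
  let kc := if color = "rainbow" then '\\' :: pvColorsA.getD (st.2 % 6) [] else katexColor
  if ch = ' ' then (st.1 ++ ['\\', ' '], st.2)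
  else (st.1 ++ kc ++ ['{', ch, '}'], st.2 + 1)

def katex_generator (txt : String) (size : String) (color : String) : String :=
  -- txt = " ".join(txt.split()); then the char loop with state (text, index); then the size prefix
  String.ofList ('$' ::
    ((if size.toList ≠ [] then '\\' :: size.toList else size.toList) ++
     ((PySem.Chars.join [' '] (PySem.Chars.split₀ txt.toList)).foldl
        (pvStepA color (if color.toList ≠ [] ∧ color ≠ "rainbow" then '\\' :: color.toList else []))
        ([], 0)).1 ++ ['$']))

-- ===== PORT B =====
def pvColorsB : List (List Char) :=
  ["red".toList, "orange".toList, "green".toList, "blue".toList, "purple".toList, "pink".toList]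

-- kc + "{" + ch + "}" for the count-th non-space character
def pvPiece (color : String) (count : Nat) (ch : Char) : List Char :=
  let kc :=
    if color = "rainbow" then '\\' :: pvColorsB.getD (count % 6) []
    else if color.toList ≠ [] then '\\' :: color.toList
    else []
  kc ++ ['{', ch, '}']

-- inner loop: builds one word's piece list, threading the running count
def pvWordB (color : String) (count : Nat) (w : List Char) : List Char × Nat :=
  w.foldl (fun (st : List Char × Nat) ch => (st.1 ++ pvPiece color st.2 ch, st.2 + 1)) ([], count)

-- outer loop over the words; state = (pieces, count)
def pvStepB (color : String) (st : List (List Char) × Nat) (w : List Char) :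
    List (List Char) × Nat :=
  let r := pvWordB color st.2 w
  (st.1 ++ [r.1], r.2)

def katex_generator_alt (txt : String) (size : String) (color : String) : String :=
  -- pieces built word-by-word, joined with "\\ ", then the size prefix and the "$…$" wrap
  String.ofList ('$' ::
    ((if size.toList ≠ [] then '\\' :: size.toList else []) ++
     PySem.Chars.join ['\\', ' ']
       ((PySem.Chars.split₀ txt.toList).foldl (pvStepB color) ([], 0)).1 ++ ['$']))

-- ===== PRECONDITION & SPEC =====
def Spec_katex_generator (txt : String) (size : String) (color : String) (out : String) : Prop := out = katex_generator_alt txt size color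
instance (txt : String) (size : String) (color : String) (out : String) : Decidable (Spec_katex_generator txt size color out) := by unfold Spec_katex_generator; infer_instance

-- ===== CLAIM (what is proved, stated in full; the proofs are below) =====
def Claim_equal_katex_generator : Prop := ∀ (txt : String) (size : String) (color : String), Dom_katex_generator txt size color → Spec_katex_generator txt size color (katex_generator txt size color)

-- ===== LEMMAS AND PROOFS =====

theorem pv_intercalate_cons_cons (sep x y : List Char) (zs : List (List Char)) :
    sep.intercalate (x :: y :: zs) = x ++ sep ++ sep.intercalate (y :: zs) := by
  simp [List.intercalate, List.intersperse]

theorem pv_intercalate_singleton (sep x : List Char) : sep.intercalate [x] = x := by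
  simp [List.intercalate]

-- A's non-space step appends exactly B's piece
theorem pvStepA_piece (color : String) (ch : Char) (hch : ch ≠ ' ') (acc : List Char) (n : Nat) :
    pvStepA color (if color.toList ≠ [] ∧ color ≠ "rainbow" then '\\' :: color.toList else [])
      (acc, n) ch = (acc ++ pvPiece color n ch, n + 1) := by
  by_cases hr : color = "rainbow"
  · simp [pvStepA, pvPiece, hr, hch, pvColorsA, pvColorsB]
  · by_cases he : color.toList = []
    · simp [pvStepA, pvPiece, hr, he, hch]
    · simp [pvStepA, pvPiece, hr, he, hch]

theorem pvStepA_space (color : String) (kc : List Char) (acc : List Char) (n : Nat) :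
    pvStepA color kc (acc, n) ' ' = (acc ++ ['\\', ' '], n) := by
  simp [pvStepA]

-- B's inner fold with an accumulator prefix
theorem pvWordB_shift (color : String) (w : List Char) :
    ∀ (x : List Char) (n : Nat),
      w.foldl (fun (st : List Char × Nat) ch => (st.1 ++ pvPiece color st.2 ch, st.2 + 1)) (x, n)
        = (x ++ (pvWordB color n w).1, (pvWordB color n w).2) := by
  induction w with
  | nil => intro x n; simp [pvWordB]
  | cons c w ih =>
    intro x n
    have h1 := ih (x ++ pvPiece color n c) (n + 1)
    have h2 := ih (pvPiece color n c) (n + 1)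
    simp only [List.foldl_cons] at *
    rw [h1]
    simp [pvWordB, List.foldl_cons] at h2 ⊢
    rw [h2]
    simp

-- A's flat fold over a space-free word = B's word fold
theorem pvWord_eq (color : String) (w : List Char) (hw : ' ' ∉ w) :
    ∀ (acc : List Char) (n : Nat),
      w.foldl (pvStepA color
          (if color.toList ≠ [] ∧ color ≠ "rainbow" then '\\' :: color.toList else []))
        (acc, n)
        = (acc ++ (pvWordB color n w).1, (pvWordB color n w).2) := by
  induction w with
  | nil => intro acc n; simp [pvWordB]
  | cons c w ih =>
    intro acc n
    have hc : c ≠ ' ' := by intro h; exact hw (by simp [h])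
    have hw' : ' ' ∉ w := fun h => hw (by simp [h])
    simp only [List.foldl_cons, pvStepA_piece color c hc acc n]
    rw [ih hw' (acc ++ pvPiece color n c) (n + 1)]
    have h2 := pvWordB_shift color w (pvPiece color n c) (n + 1)
    simp [pvWordB, List.foldl_cons] at h2 ⊢
    rw [h2]
    simp

-- B's outer fold with a pieces prefix
theorem pvStepB_shift (color : String) (ws : List (List Char)) :
    ∀ (ps : List (List Char)) (n : Nat),
      ws.foldl (pvStepB color) (ps, n)
        = (ps ++ (ws.foldl (pvStepB color) ([], n)).1, (ws.foldl (pvStepB color) ([], n)).2) := by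
  induction ws with
  | nil => intro ps n; simp
  | cons w ws ih =>
    intro ps n
    simp only [List.foldl_cons, pvStepB, List.nil_append]
    rw [ih (ps ++ [(pvWordB color n w).1]) (pvWordB color n w).2,
        ih [(pvWordB color n w).1] (pvWordB color n w).2]
    simp

-- main invariant: A's fold over " ".join(ws) = B's pieces joined with "\ ", same final count
theorem pvMain (color : String) (ws : List (List Char)) (hws : ∀ w ∈ ws, ' ' ∉ w) :
    ∀ (acc : List Char) (n : Nat),
      (PySem.Chars.join [' '] ws).foldl (pvStepA color
          (if color.toList ≠ [] ∧ color ≠ "rainbow" then '\\' :: color.toList else []))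
        (acc, n)
        = (acc ++ PySem.Chars.join ['\\', ' '] ((ws.foldl (pvStepB color) ([], n)).1),
           (ws.foldl (pvStepB color) ([], n)).2) := by
  induction ws with
  | nil => intro acc n; simp [PySem.Chars.join, List.intercalate]
  | cons w ws ih =>
    intro acc n
    have hw : ' ' ∉ w := hws w (by simp)
    have hws' : ∀ v ∈ ws, ' ' ∉ v := fun v hv => hws v (by simp [hv])
    cases ws with
    | nil =>
      simp only [PySem.Chars.join, pv_intercalate_singleton]
      rw [pvWord_eq color w hw acc n]
      simp [pvStepB, pv_intercalate_singleton]
    | cons w' ws' =>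
      have hjoin : PySem.Chars.join [' '] (w :: w' :: ws')
          = w ++ ' ' :: PySem.Chars.join [' '] (w' :: ws') := by
        simp [PySem.Chars.join, pv_intercalate_cons_cons]
      rw [hjoin, List.foldl_append, pvWord_eq color w hw acc n, List.foldl_cons,
          pvStepA_space, ih hws' (acc ++ (pvWordB color n w).1 ++ ['\\', ' '])
            (pvWordB color n w).2]
      have hB : (w :: w' :: ws').foldl (pvStepB color) ([], n)
          = ([(pvWordB color n w).1] ++ ((w' :: ws').foldl (pvStepB color)
              ([], (pvWordB color n w).2)).1,
             ((w' :: ws').foldl (pvStepB color) ([], (pvWordB color n w).2)).2) := by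
        have h0 : (w :: w' :: ws').foldl (pvStepB color) ([], n)
            = (w' :: ws').foldl (pvStepB color)
                ([(pvWordB color n w).1], (pvWordB color n w).2) := rfl
        rw [h0, pvStepB_shift color (w' :: ws') [(pvWordB color n w).1] (pvWordB color n w).2]
      rw [hB]
      rcases hP : ((w' :: ws').foldl (pvStepB color) ([], (pvWordB color n w).2)) with ⟨ps, m⟩
      have hps : ps ≠ [] := by
        rcases hQ : ((ws').foldl (pvStepB color)
            ([], (pvWordB color (pvWordB color n w).2 w').2)) with ⟨qs, k⟩
        simp only [List.foldl_cons, pvStepB] at hP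
        rw [pvStepB_shift color ws' _ _] at hP
        simp [hQ] at hP
        rcases hP with ⟨hP1, _⟩
        simp [← hP1]
      cases ps with
      | nil => exact absurd rfl hps
      | cons p ps' =>
        simp [PySem.Chars.join, pv_intercalate_cons_cons]

-- words produced by split₀ contain no space characters
theorem pv_go_no_space :
    ∀ (s cur : List Char) (acc : List (List Char)),
      (∀ c ∈ cur, PySem.Chars.isspace c = false) →
      (∀ w ∈ acc, ∀ c ∈ w, PySem.Chars.isspace c = false) →
      ∀ w ∈ PySem.Chars.split₀.go s cur acc, ∀ c ∈ w, PySem.Chars.isspace c = false := by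
  intro s
  induction s with
  | nil =>
    intro cur acc hcur hacc w hw
    simp only [PySem.Chars.split₀.go] at hw
    split at hw
    · exact hacc w (by simpa using hw)
    · simp only [List.mem_reverse, List.mem_cons] at hw
      rcases hw with h | h
      · intro c hc; exact hcur c (by simpa [h] using hc)
      · exact hacc w (by simpa using h)
  | cons c rest ih =>
    intro cur acc hcur hacc w hw
    simp only [PySem.Chars.split₀.go] at hw
    split at hw
    · split at hw
      · exact ih [] acc (by simp) hacc w hw
      · refine ih [] (cur.reverse :: acc) (by simp) ?_ w hw
        intro v hv
        simp only [List.mem_cons] at hv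
        rcases hv with h | h
        · intro d hd; exact hcur d (by simpa [h] using hd)
        · exact hacc v h
    · next hcsp =>
      refine ih (c :: cur) acc ?_ hacc w hw
      intro d hd
      simp only [List.mem_cons] at hd
      rcases hd with h | h
      · simpa [h] using hcsp
      · exact hcur d h

theorem pv_split_no_space (cs : List Char) :
    ∀ w ∈ PySem.Chars.split₀ cs, ' ' ∉ w := by
  intro w hw hmem
  have := pv_go_no_space cs [] [] (by simp) (by simp) w
    (by simpa [PySem.Chars.split₀] using hw) ' ' hmem
  simp [PySem.Chars.isspace] at this

-- ===== VERDICT (by name: the statement is the Claim_ definition above) =====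
theorem katex_generator_spec : Claim_equal_katex_generator := by
  intro txt size color _
  unfold Spec_katex_generator katex_generator katex_generator_alt
  rw [pvMain color (PySem.Chars.split₀ txt.toList) (pv_split_no_space txt.toList) [] 0]
  simp
  split_ifs with h <;> simp [h]
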